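-- pv_equiv track=rewrite | github.com/EmiCuciu/CS-UBB-FMI-INFO | 1st Year/Fundamentele Programarii/Laboratoare/lab3/main.py | secv_max
-- ===== SOURCE A (Python) =====
-- def doua_cifre_comune(nr1, nr2):
--     cifre_nr1 = set(str(nr1))
--     cifre_nr2 = set(str(nr2))
--     cifre_comune = cifre_nr1.intersection(cifre_nr2)
--     return len(cifre_comune) >= 2
--
-- def secv_max(lista):
--     lungime_max = 0
--     secventa_max = []
--     for i in range(len(lista) - 1):
--         nr1 = lista[i]
--         nr2 = lista[i + 1]
--         if doua_cifre_comune(nr1, nr2):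
--             secventa_curenta = [nr1, nr2]
--             for j in range(i + 2, len(lista)):
--                 nr3 = lista[j]
--                 if doua_cifre_comune(secventa_curenta[-1], nr3):
--                     secventa_curenta.append(nr3)
--                 else:
--                     break
--             if len(secventa_curenta) > lungime_max:
--                 lungime_max = len(secventa_curenta)
--                 secventa_max = secventa_curenta
--     if secventa_max:
--         return secventa_max
-- ===== SOURCE B (Python) =====
-- def doua_cifre_comune(nr1, nr2):
--     return len(set(str(nr1)) & set(str(nr2))) >= 2
--
-- def secv_max(lista):
--     # single pass: track the current run of adjacent-compatible elements,
--     # flush it when adjacency breaks, keep the first longest run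
--     best_len = 0
--     best_start = 0
--     run = 0
--     run_start = 0
--     for k in range(len(lista) - 1):
--         if doua_cifre_comune(lista[k], lista[k + 1]):
--             if run == 0:
--                 run_start = k
--                 run = 2
--             else:
--                 run += 1
--         else:
--             if run > best_len:
--                 best_len, best_start = run, run_start
--             run = 0
--     if run > best_len:
--         best_len, best_start = run, run_start
--     if best_len:
--         return lista[best_start:best_start + best_len]
-- ===== Notes on version B (the rewrite author's own statement) =====
-- stated objective: faster
-- what changed: A restarts and regrows the whole run from every index (quadratic adjacency tests); B makes a single pass over the consecutive-pair adjacency predicate, tracking the current run's start/length and flushing it when adjacency breaks, keeping the first strictly-longest run and slicing it out at the end.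
import Mathlib
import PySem

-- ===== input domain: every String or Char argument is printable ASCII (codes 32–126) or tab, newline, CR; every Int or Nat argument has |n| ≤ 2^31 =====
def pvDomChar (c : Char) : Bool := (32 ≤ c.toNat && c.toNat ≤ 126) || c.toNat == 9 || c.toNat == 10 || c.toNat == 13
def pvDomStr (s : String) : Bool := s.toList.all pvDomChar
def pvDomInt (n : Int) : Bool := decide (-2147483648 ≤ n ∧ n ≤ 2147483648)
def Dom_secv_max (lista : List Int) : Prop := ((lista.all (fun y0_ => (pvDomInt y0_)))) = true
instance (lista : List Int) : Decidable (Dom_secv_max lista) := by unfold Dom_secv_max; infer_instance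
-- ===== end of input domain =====

-- B replaces A's restart-from-every-index scan (O(n^2) adjacency tests) by a single pass over the
-- adjacency predicate that tracks the current run and keeps the first longest (O(n) adjacency tests).

-- ===== PORT A =====
-- doua_cifre_comune: set(str(nr1)) ∩ set(str(nr2)) has at least 2 elements (shared by both Pythons)
def pvComune (nr1 nr2 : Int) : Bool :=
  decide (2 ≤ PySem.Set.len (PySem.Set.inter (PySem.Set.ofList (PySem.Int.toStr nr1).toList)
                                             (PySem.Set.ofList (PySem.Int.toStr nr2).toList)))

-- A's inner 'for j in range(i+2, len(lista)) … break' loop; cur is always nonempty, so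
-- secventa_curenta[-1] is exactly cur.getLast!
def secvInner (lista : List Int) (cur : List Int) (j : Nat) : List Int :=
  if _h : j < lista.length then
    if pvComune (cur.getLast!) (lista.getD j 0) then
      secvInner lista (cur ++ [lista.getD j 0]) (j + 1)
    else cur
  else cur
termination_by lista.length - j

-- A's outer loop body (state = (lungime_max, secventa_max))
def pvStepA (lista : List Int) (st : Nat × List Int) (i : Nat) : Nat × List Int :=
  if pvComune (lista.getD i 0) (lista.getD (i + 1) 0) then
    let cur := secvInner lista [lista.getD i 0, lista.getD (i + 1) 0] (i + 2)
    if st.1 < cur.length then (cur.length, cur) else st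
  else st

def secv_max (lista : List Int) : Option (List Int) :=
  let st := (List.range (lista.length - 1)).foldl (pvStepA lista) (0, [])
  if st.2.isEmpty then none else some st.2

-- ===== PORT B =====
-- B's loop body (state = (best_len, best_start, run, run_start))
def pvStepB (lista : List Int) (st : Nat × Nat × Nat × Nat) (k : Nat) : Nat × Nat × Nat × Nat :=
  let (bl, bs, run, rs) := st
  if pvComune (lista.getD k 0) (lista.getD (k + 1) 0) then
    if run = 0 then (bl, bs, 2, k) else (bl, bs, run + 1, rs)
  else
    if bl < run then (run, rs, 0, rs) else (bl, bs, 0, rs)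

def secv_max_alt (lista : List Int) : Option (List Int) :=
  let st := (List.range (lista.length - 1)).foldl (pvStepB lista) (0, 0, 0, 0)
  let (bl, bs, run, rs) := st
  let (bl, bs) := if bl < run then (run, rs) else (bl, bs)
  -- lista[best_start : best_start + best_len] with 0 ≤ bs ≤ bs+bl (= PySem.List.slice, slice_natCast_add)
  if bl = 0 then none else some ((lista.drop bs).take bl)

-- ===== PRECONDITION & SPEC =====
def Spec_secv_max (lista : List Int) (out : Option (List Int)) : Prop := out = secv_max_alt lista
instance (lista : List Int) (out : Option (List Int)) : Decidable (Spec_secv_max lista out) := by unfold Spec_secv_max; infer_instance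

-- ===== CLAIM (what is proved, stated in full; the proofs are below) =====
def Claim_equal_secv_max : Prop := ∀ (lista : List Int), Dom_secv_max lista → Spec_secv_max lista (secv_max lista)

-- ===== LEMMAS AND PROOFS =====

-- adjacency between consecutive positions
def adj (l : List Int) (k : Nat) : Bool := pvComune (l.getD k 0) (l.getD (k + 1) 0)

-- number of consecutive adjacencies starting at j
def runlen (l : List Int) (j : Nat) : Nat :=
  if j + 1 < l.length then (if adj l j then runlen l (j + 1) + 1 else 0) else 0
termination_by l.length - j

-- slice l[s:t]
def sl (l : List Int) (s t : Nat) : List Int := (l.drop s).take (t - s)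

lemma sl_self (l : List Int) (s : Nat) : sl l s s = [] := by simp [sl]

lemma getLast!_concat_int (xs : List Int) (a : Int) : (xs ++ [a]).getLast! = a := by
  cases xs with
  | nil => rfl
  | cons h t => simp [List.getLast!]

lemma sl_snoc (l : List Int) {s j : Nat} (h1 : s ≤ j) (h2 : j < l.length) :
    sl l s (j + 1) = sl l s j ++ [l.getD j 0] := by
  unfold sl
  have : j + 1 - s = (j - s) + 1 := by omega
  rw [this, List.take_add_one]
  have hg : (l.drop s)[j - s]? = some (l.getD j 0) := by
    rw [List.getElem?_drop]
    have hs : s + (j - s) = j := by omega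
    rw [hs, List.getElem?_eq_getElem h2, List.getD_eq_getElem _ _ h2]
  simp [hg]

lemma sl_getLast (l : List Int) {s j : Nat} (h1 : s < j) (h2 : j ≤ l.length) :
    (sl l s j).getLast! = l.getD (j - 1) 0 := by
  have hj : j = (j - 1) + 1 := by omega
  rw [hj, sl_snoc l (by omega) (by omega), getLast!_concat_int]
  simp

lemma sl_length (l : List Int) {s t : Nat} (h1 : s ≤ t) (h2 : t ≤ l.length) :
    (sl l s t).length = t - s := by
  simp [sl]; omega


lemma runlen_zero (l : List Int) {j : Nat} (h : ¬ (j + 1 < l.length) ∨ adj l j = false) :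
    runlen l j = 0 := by
  unfold runlen
  rcases h with h | h
  · simp [h]
  · simp [h]

lemma runlen_succ (l : List Int) {j : Nat} (h1 : j + 1 < l.length) (h2 : adj l j = true) :
    runlen l j = runlen l (j + 1) + 1 := by
  unfold runlen
  rw [if_pos h1, if_pos h2]
  conv_lhs => rw [runlen]

lemma runlen_le (l : List Int) (j : Nat) : j + 1 + runlen l j ≤ l.length ∨ runlen l j = 0 := by
  by_cases h1 : j + 1 < l.length
  · by_cases h2 : adj l j = true
    · rw [runlen_succ l h1 h2]
      rcases runlen_le l (j + 1) with h | h
      · left; omega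
      · left; omega
    · right; exact runlen_zero l (Or.inr (by simpa using h2))
  · right; exact runlen_zero l (Or.inl h1)
termination_by l.length - j

lemma runlen_block (l : List Int) {s k : Nat} (h1 : s ≤ k) (h2 : k < l.length)
    (h3 : ∀ j, s ≤ j → j < k → adj l j = true) :
    runlen l s = (k - s) + runlen l k := by
  rcases Nat.eq_or_lt_of_le h1 with he | hlt
  · subst he; omega
  · have hs1 : s + 1 < l.length := by omega
    rw [runlen_succ l hs1 (h3 s (le_refl s) hlt)]
    have := runlen_block l (s := s + 1) (k := k) (by omega) h2
      (fun j hj1 hj2 => h3 j (by omega) hj2)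
    omega
termination_by k - s

set_option maxHeartbeats 1000000 in
lemma inner_spec (l : List Int) (j s : Nat) (h1 : s < j) (h2 : j ≤ l.length) :
    secvInner l (sl l s j) j = sl l s (j + runlen l (j - 1)) := by
  have hj1 : j - 1 + 1 = j := by omega
  by_cases hj : j < l.length
  · rw [secvInner, dif_pos hj]
    by_cases ha : adj l (j - 1) = true
    · have ha2 : pvComune (l.getD (j - 1) 0) (l.getD j 0) = true := by
        unfold adj at ha; rwa [hj1] at ha
      have hc : pvComune ((sl l s j).getLast!) (l.getD j 0) = true := by
        rwa [sl_getLast l h1 h2]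
      rw [if_pos hc,
          ← sl_snoc l (by omega) hj,
          inner_spec l (j + 1) s (by omega) (by omega),
          Nat.add_sub_cancel,
          runlen_succ l (j := j - 1) (by omega) (by unfold adj; rwa [hj1]), hj1]
      congr 1
      omega
    · have ha2 : pvComune (l.getD (j - 1) 0) (l.getD j 0) = false := by
        unfold adj at ha
        rw [hj1] at ha
        simpa using ha
      have hc : ¬ (pvComune ((sl l s j).getLast!) (l.getD j 0) = true) := by
        rw [sl_getLast l h1 h2, ha2]; simp
      rw [if_neg hc, runlen_zero l (Or.inr (by unfold adj; rwa [hj1])), Nat.add_zero]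
  · rw [secvInner, dif_neg hj, runlen_zero l (Or.inl (by omega)), Nat.add_zero]
termination_by l.length - j

lemma sl_pair (l : List Int) {k : Nat} (hk : k + 1 < l.length) :
    sl l k (k + 2) = [l.getD k 0, l.getD (k + 1) 0] := by
  have h2 : k + 2 = (k + 1) + 1 := rfl
  rw [h2, sl_snoc l (by omega) hk, sl_snoc l (by omega) (by omega), sl_self]
  simp

lemma cur_spec (l : List Int) {k : Nat} (hk : k + 1 < l.length) (ha : adj l k = true) :
    secvInner l [l.getD k 0, l.getD (k + 1) 0] (k + 2) = sl l k (k + runlen l k + 1) ∧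
    (secvInner l [l.getD k 0, l.getD (k + 1) 0] (k + 2)).length = runlen l k + 1 := by
  have hb : k + runlen l k + 1 ≤ l.length := by
    rcases runlen_le l k with h | h
    · omega
    · omega
  have he : secvInner l [l.getD k 0, l.getD (k + 1) 0] (k + 2) = sl l k (k + runlen l k + 1) := by
    rw [← sl_pair l hk, inner_spec l (k + 2) k (by omega) (by omega)]
    have h21 : k + 2 - 1 = k + 1 := rfl
    rw [h21, runlen_succ l hk ha]
    congr 1
    omega
  refine ⟨he, ?_⟩
  rw [he, sl_length l (by omega) hb]
  omega

-- invariant relating A's and B's states after processing indices [0,k)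
def RunInv (l : List Int) (k : Nat) (a : Nat × List Int) (b : Nat × Nat × Nat × Nat) : Prop :=
  (b.1 = 0 ∨ (2 ≤ b.1 ∧ b.2.1 + b.1 ≤ l.length)) ∧
  (b.2.2.1 = 0 →
    ((k = 0 ∨ adj l (k - 1) = false) ∧ a = (b.1, sl l b.2.1 (b.2.1 + b.1)))) ∧
  (b.2.2.1 ≠ 0 →
    (b.2.2.1 = k + 1 - b.2.2.2 ∧ b.2.2.2 + 1 ≤ k ∧
     (∀ j, b.2.2.2 ≤ j → j < k → adj l j = true) ∧
     (b.2.2.2 = 0 ∨ adj l (b.2.2.2 - 1) = false) ∧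
     a = (if b.1 < runlen l b.2.2.2 + 1
          then (runlen l b.2.2.2 + 1, sl l b.2.2.2 (b.2.2.2 + runlen l b.2.2.2 + 1))
          else (b.1, sl l b.2.1 (b.2.1 + b.1)))))

lemma RunInv_mk (l : List Int) (k : Nat) (a : Nat × List Int) (bl bs run rs : Nat)
    (h1 : bl = 0 ∨ (2 ≤ bl ∧ bs + bl ≤ l.length))
    (h2 : run = 0 → ((k = 0 ∨ adj l (k - 1) = false) ∧ a = (bl, sl l bs (bs + bl))))
    (h3 : run ≠ 0 →
      (run = k + 1 - rs ∧ rs + 1 ≤ k ∧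
       (∀ j, rs ≤ j → j < k → adj l j = true) ∧
       (rs = 0 ∨ adj l (rs - 1) = false) ∧
       a = (if bl < runlen l rs + 1
            then (runlen l rs + 1, sl l rs (rs + runlen l rs + 1))
            else (bl, sl l bs (bs + bl))))) :
    RunInv l k a (bl, bs, run, rs) := ⟨h1, h2, h3⟩

set_option maxHeartbeats 2000000 in
lemma inv_step (l : List Int) (k : Nat) (hk : k + 1 ≤ l.length - 1)
    (a : Nat × List Int) (b : Nat × Nat × Nat × Nat) (h : RunInv l k a b) :
    RunInv l (k + 1) (pvStepA l a k) (pvStepB l b k) := by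
  obtain ⟨bl, bs, run, rs⟩ := b
  obtain ⟨hbl, h0, hpos⟩ := h
  simp only at hbl h0 hpos
  have hklen : k + 1 < l.length := by omega
  by_cases hadj : adj l k = true
  · have hadj' : pvComune (l.getD k 0) (l.getD (k + 1) 0) = true := hadj
    obtain ⟨hcur, hlen⟩ := cur_spec l hklen hadj
    have hrl1 : 1 ≤ runlen l k := by
      rw [runlen_succ l hklen hadj]; omega
    by_cases hrun : run = 0
    · subst hrun
      obtain ⟨hk0, ha0⟩ := h0 rfl
      have hstepB : pvStepB l (bl, bs, 0, rs) k = (bl, bs, 2, k) := by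
        simp only [pvStepB]; rw [if_pos hadj']; simp
      have hstepA : pvStepA l a k =
          (if bl < runlen l k + 1
           then (runlen l k + 1, sl l k (k + runlen l k + 1)) else (bl, sl l bs (bs + bl))) := by
        simp only [pvStepA]
        rw [if_pos hadj', hlen, hcur, ha0]
      rw [hstepB, hstepA]
      apply RunInv_mk
      · exact hbl
      · intro h2; exact absurd h2 (by norm_num)
      · intro _
        refine ⟨by omega, by omega, ?_, hk0, rfl⟩
        intro j hj1 hj2
        have hjk : j = k := by omega
        rwa [hjk]
    · obtain ⟨hr1, hr2, hr3, hr4, ha1⟩ := hpos hrun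
      have hblock := runlen_block l (s := rs) (k := k) (by omega) (by omega) hr3
      have hstepB : pvStepB l (bl, bs, run, rs) k = (bl, bs, run + 1, rs) := by
        simp only [pvStepB]; rw [if_pos hadj', if_neg hrun]
      have hnoup : ¬ (a.1 < (secvInner l [l.getD k 0, l.getD (k + 1) 0] (k + 2)).length) := by
        rw [hlen, ha1]
        by_cases hbc : bl < runlen l rs + 1
        · rw [if_pos hbc]; show ¬ (runlen l rs + 1 < runlen l k + 1); omega
        · rw [if_neg hbc]; show ¬ (bl < runlen l k + 1); omega
      have hstepA : pvStepA l a k = a := by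
        simp only [pvStepA]; rw [if_pos hadj', if_neg hnoup]
      rw [hstepB, hstepA]
      apply RunInv_mk
      · exact hbl
      · intro h2; exact absurd h2 (by omega)
      · intro _
        refine ⟨by omega, by omega, ?_, hr4, ha1⟩
        intro j hj1 hj2
        rcases Nat.lt_or_ge j k with hjk | hjk
        · exact hr3 j hj1 hjk
        · have hjeq : j = k := by omega
          rwa [hjeq]
  · have hadj' : ¬ (pvComune (l.getD k 0) (l.getD (k + 1) 0) = true) := hadj
    have hadjf : adj l k = false := by simpa using hadj
    have hstepA : pvStepA l a k = a := by
      simp only [pvStepA]; rw [if_neg hadj']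
    rw [hstepA]
    by_cases hrun : run = 0
    · subst hrun
      obtain ⟨hk0, ha0⟩ := h0 rfl
      have hstepB : pvStepB l (bl, bs, 0, rs) k = (bl, bs, 0, rs) := by
        simp only [pvStepB]; rw [if_neg hadj']; simp
      rw [hstepB]
      apply RunInv_mk
      · exact hbl
      · intro _; exact ⟨Or.inr hadjf, ha0⟩
      · intro h2; exact absurd rfl h2
    · obtain ⟨hr1, hr2, hr3, hr4, ha1⟩ := hpos hrun
      have hrlk : runlen l k = 0 := runlen_zero l (Or.inr hadjf)
      have hblock := runlen_block l (s := rs) (k := k) (by omega) (by omega) hr3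
      have hC : runlen l rs + 1 = run := by omega
      by_cases hbc : bl < run
      · have hstepB : pvStepB l (bl, bs, run, rs) k = (run, rs, 0, rs) := by
          simp only [pvStepB]; rw [if_neg hadj', if_pos hbc]
        rw [hstepB]
        apply RunInv_mk
        · right; exact ⟨by omega, by omega⟩
        · intro _
          refine ⟨Or.inr hadjf, ?_⟩
          rw [ha1]
          rw [show rs + runlen l rs + 1 = rs + run from by omega, hC, if_pos hbc]
        · intro h2; exact absurd rfl h2
      · have hstepB : pvStepB l (bl, bs, run, rs) k = (bl, bs, 0, rs) := by
          simp only [pvStepB]; rw [if_neg hadj', if_neg hbc]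
        rw [hstepB]
        apply RunInv_mk
        · exact hbl
        · intro _
          refine ⟨Or.inr hadjf, ?_⟩
          rw [ha1, hC, if_neg hbc]
        · intro h2; exact absurd rfl h2

lemma inv_fold (l : List Int) (k : Nat) (hk : k ≤ l.length - 1) :
    RunInv l k ((List.range k).foldl (pvStepA l) (0, []))
            ((List.range k).foldl (pvStepB l) (0, 0, 0, 0)) := by
  induction k with
  | zero =>
    exact ⟨Or.inl rfl, fun _ => ⟨Or.inl rfl, rfl⟩, fun h => absurd rfl h⟩
  | succ k ih =>
    rw [List.range_succ, List.foldl_append, List.foldl_append,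
        List.foldl_cons, List.foldl_cons, List.foldl_nil, List.foldl_nil]
    exact inv_step l k hk _ _ (ih (by omega))

lemma take_drop_isEmpty_false (l : List Int) (bl bs : Nat) (h2 : 2 ≤ bl)
    (h3 : bs + bl ≤ l.length) : ((l.drop bs).take bl).isEmpty = false := by
  have hlen : ((l.drop bs).take bl).length = bl := by simp; omega
  have : ((l.drop bs).take bl) ≠ [] := by
    intro he; rw [he] at hlen; simp at hlen; omega
  simpa [List.isEmpty_iff] using this

lemma main_eq (l : List Int) : secv_max l = secv_max_alt l := by
  have hinv := inv_fold l (l.length - 1) (le_refl _)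
  rcases hB : (List.range (l.length - 1)).foldl (pvStepB l) (0, 0, 0, 0) with ⟨bl, bs, run, rs⟩
  rw [hB] at hinv
  obtain ⟨hbl, h0, hpos⟩ := hinv
  simp only at hbl h0 hpos
  have hsl : sl l bs (bs + bl) = (l.drop bs).take bl := by
    unfold sl; rw [Nat.add_sub_cancel_left]
  unfold secv_max secv_max_alt
  rw [hB]
  by_cases hrun : run = 0
  · subst hrun
    obtain ⟨_, ha0⟩ := h0 rfl
    rw [ha0]
    dsimp only
    rw [if_neg (by omega : ¬ bl < 0)]
    rcases hbl with h0' | ⟨h2, h3⟩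
    · subst h0'
      rw [if_pos rfl]
      simp [sl]
    · rw [hsl, if_neg (by omega : ¬ bl = 0), take_drop_isEmpty_false l bl bs h2 h3]
      rfl
  · obtain ⟨hr1, hr2, hr3, hr4, ha1⟩ := hpos hrun
    have hlen2 : 2 ≤ l.length := by omega
    have hkl : l.length - 1 < l.length := by omega
    have hrlk : runlen l (l.length - 1) = 0 := runlen_zero l (Or.inl (by omega))
    have hblock := runlen_block l (s := rs) (k := l.length - 1) (by omega) hkl hr3
    have hC : runlen l rs + 1 = run := by omega
    have hrun2 : 2 ≤ run := by omega
    have hrsrun : rs + run ≤ l.length := by omega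
    rw [ha1, show rs + runlen l rs + 1 = rs + run from by omega, hC]
    have hsl2 : sl l rs (rs + run) = (l.drop rs).take run := by
      unfold sl; rw [Nat.add_sub_cancel_left]
    dsimp only
    by_cases hbc : bl < run
    · rw [if_pos hbc, if_pos hbc]
      dsimp only
      rw [hsl2, if_neg (by omega : ¬ run = 0), take_drop_isEmpty_false l run rs hrun2 hrsrun]
      rfl
    · rw [if_neg hbc, if_neg hbc]
      dsimp only
      have h2 : 2 ≤ bl := by omega
      have h3 : bs + bl ≤ l.length := by
        rcases hbl with h | h
        · omega
        · omega
      rw [hsl, if_neg (by omega : ¬ bl = 0), take_drop_isEmpty_false l bl bs h2 h3]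
      rfl

-- ===== VERDICT (by name: the statement is the Claim_ definition above) =====
theorem secv_max_spec : Claim_equal_secv_max := by
  intro l _
  unfold Spec_secv_max
  exact main_eq l
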